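-- pv_equiv track=rewrite | github.com/maniospas/pySynthesis | synthesis/analysis.py | get_input_variables
-- ===== SOURCE A (Python) =====
-- equality_predicate = " <--> "
--
-- def _is_valid_variable(text):
--     if len(text)==0:
--         return False
--     for c in text:
--         if _is_not_var_symbol(c):
--             return False
--     return True
--
-- def _get_asignment_pos(text):
--     level = 0
--     for pos, c in enumerate(text):
--         if _is_left_parenthesis_symbol(c):
--             level += 1
--         if _is_right_parenthesis_symbol(c):
--             level -= 1
--         if level==0 and c=="=" and pos>0 and not _is_math_symbol(text[pos-1]) and pos<len(text)-1 and text[pos+1]!="=":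
--             return pos
--     return -1
--
-- def _is_math_symbol(text):
--     valid_symbols = "<>=!"
--     if text in valid_symbols:
--         return True
--     return False
--
-- def _is_not_var_symbol(text):
--     valid_symbols = ".,!@#$%^/&*()-+={}[]:\t=<>`'\" "
--     if text in valid_symbols:
--         return True
--     return False
--
-- def _is_left_parenthesis_symbol(text):
--     parenthesis_symbols = "({[\"'"
--     if text in parenthesis_symbols:
--         return True
--     return False
--
-- def _is_right_parenthesis_symbol(text):
--     parenthesis_symbols = ")}]\"'"
--     if text in parenthesis_symbols:
--         return True
--     return False
--
-- def get_input_variables(expressions, known_variables):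
--     """
--     Extracts which of the given variables are used by the given expressions to calculate quantities before they are
--     assigned any value.
--     Example:
--         >>> get_input_variables(["y_test = y_test + noise()", "y_hat = model.predict(x_test)", "AUC(y_test, y_hat)"],
--         ...         ["baseline", "model", "x_test", "y_test", "y_hat", "random_var", "y_test"])
--         ['baseline', 'x_test', 'x_test']
--     """
--     known_variables = list(known_variables)
--     variables = list()
--     for expression in expressions:
--         assigned_variable = None
--         if equality_predicate in expression:
--             assigned_variable = expression.split(equality_predicate)[0].strip()
--             expression = expression.split(equality_predicate)[1]
--         else:
--             assignment_pos = _get_asignment_pos(expression)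
--             if assignment_pos != -1:
--                 assigned_variable = expression[:assignment_pos].strip()
--                 expression = expression[assignment_pos:]
--         current_var = ""
--         last_symbol = ""
--         for c in expression+" ":
--             if _is_not_var_symbol(c):
--                 if _is_valid_variable(current_var) and last_symbol!="." and current_var in known_variables:
--                     variables.append(current_var)
--                 current_var = ""
--                 last_symbol = c
--             else:
--                 current_var += c
--         if assigned_variable is not None and assigned_variable in known_variables:
--             known_variables.remove(assigned_variable)
--     return variables
-- ===== SOURCE B (Python) =====
-- import re
--
-- equality_predicate = " <--> "
-- _SEPARATORS = ".,!@#$%^/&*()-+={}[]:\t=<>`'\" "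
-- _TOKEN_RE = re.compile("[^" + re.escape(_SEPARATORS) + "]+")
-- _MATH_SYMBOLS = "<>=!"
-- _LEFT_PARENS = "({[\"'"
-- _RIGHT_PARENS = ")}]\"'"
--
--
-- def _assignment_pos(text):
--     level = 0
--     for pos, c in enumerate(text):
--         if c in _LEFT_PARENS:
--             level += 1
--         if c in _RIGHT_PARENS:
--             level -= 1
--         if level == 0 and c == "=" and pos > 0 and text[pos - 1] not in _MATH_SYMBOLS \
--                 and pos < len(text) - 1 and text[pos + 1] != "=":
--             return pos
--     return -1
--
--
-- def get_input_variables(expressions, known_variables):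
--     known_variables = list(known_variables)
--     variables = []
--     for expression in expressions:
--         assigned_variable = None
--         if equality_predicate in expression:
--             parts = expression.split(equality_predicate)
--             assigned_variable = parts[0].strip()
--             rhs = parts[1]
--         else:
--             pos = _assignment_pos(expression)
--             if pos != -1:
--                 assigned_variable = expression[:pos].strip()
--                 rhs = expression[pos:]
--             else:
--                 rhs = expression
--         for m in _TOKEN_RE.finditer(rhs):
--             s = m.start()
--             if (s == 0 or rhs[s - 1] != ".") and m.group(0) in known_variables:
--                 variables.append(m.group(0))
--         if assigned_variable is not None and assigned_variable in known_variables: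
--             known_variables.remove(assigned_variable)
--     return variables
-- ===== Notes on version B (the rewrite author's own statement) =====
-- stated objective: idiomatic
-- what changed: B tokenizes each RHS in one regex pass over maximal non-separator runs (checking the character before each match and filtering by membership), replacing A's character-by-character state machine with current_var/last_symbol accumulators and its per-token validity re-scan.
import Mathlib
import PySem

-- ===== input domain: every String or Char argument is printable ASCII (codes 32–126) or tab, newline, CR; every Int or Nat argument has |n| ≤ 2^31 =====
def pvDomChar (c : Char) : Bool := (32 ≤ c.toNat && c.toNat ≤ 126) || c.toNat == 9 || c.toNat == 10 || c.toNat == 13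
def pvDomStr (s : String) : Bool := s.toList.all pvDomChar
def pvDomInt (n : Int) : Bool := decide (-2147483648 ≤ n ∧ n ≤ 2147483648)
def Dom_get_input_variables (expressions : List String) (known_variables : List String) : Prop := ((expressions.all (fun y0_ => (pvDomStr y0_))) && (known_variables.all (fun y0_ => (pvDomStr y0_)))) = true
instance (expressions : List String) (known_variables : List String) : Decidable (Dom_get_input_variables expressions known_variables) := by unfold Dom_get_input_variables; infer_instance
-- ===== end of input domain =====

-- B replaces A's char-by-char state machine (current_var/last_symbol accumulators) by a single
-- tokenisation pass into maximal non-separator runs (re.finditer in Source B) filtered by the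
-- preceding character and membership; objective: idiomatic. Return values only (neither mutates).

-- ===== PORT A =====
-- shared module constants/helpers (identical source text in Source A and Source B):
-- 'text in valid_symbols' for a single char is char membership in the literal's characters
def pvIsSep (c : Char) : Bool := (".,!@#$%^/&*()-+={}[]:\t=<>`'\" ".toList).contains c
def pvIsMath (c : Char) : Bool := ("<>=!".toList).contains c
def pvIsLParen (c : Char) : Bool := ("({[\"'".toList).contains c
def pvIsRParen (c : Char) : Bool := (")}]\"'".toList).contains c

-- _get_asignment_pos: pos>0 is carried as 'prev' (text[pos-1]), pos<len-1 as rest nonempty (text[pos+1])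
def pvAssignPosAux (cs : List Char) (pos : Nat) (level : Int) (prev : Option Char) : Int :=
  match cs with
  | [] => -1
  | c :: rest =>
    let l1 := if pvIsLParen c then level + 1 else level
    let l2 := if pvIsRParen c then l1 - 1 else l1
    if l2 == 0 && c == '=' &&
        (match prev with | some p => !pvIsMath p | none => false) &&
        (match rest with | c' :: _ => c' != '=' | [] => false) then
      (pos : Int)
    else pvAssignPosAux rest (pos + 1) l2 (some c)

def pvAssignPos (cs : List Char) : Int := pvAssignPosAux cs 0 0 none

-- _is_valid_variable (the early-return char loop as List.all)
def A_isValidVariable (cs : List Char) : Bool :=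
  if cs.length == 0 then false else cs.all (fun c => !pvIsSep c)

-- the inner 'for c in expression+" "' loop; state: variables, current_var, last_symbol (as List Char)
def A_scan (known : List String) : List Char → List String → List Char → List Char → List String
  | [], vars, _, _ => vars
  | c :: cs, vars, cur, last =>
    if pvIsSep c then
      let vars' := if A_isValidVariable cur && last != ['.'] && known.contains (String.ofList cur) then
          vars ++ [String.ofList cur] else vars
      A_scan known cs vars' [] [c]
    else
      A_scan known cs vars (cur ++ [c]) last

def A_loop : List String → List String → List String → List String
  | [], _, vars => vars
  | e :: es, known, vars =>
    let ar :=
      if PySem.Str.isIn " <--> " e then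
        let parts := PySem.Chars.splitOn e.toList " <--> ".toList
        (some (String.ofList (PySem.Chars.strip (PySem.List.pyGetD parts 0 []))), PySem.List.pyGetD parts 1 [])
      else
        let pos := pvAssignPos e.toList
        if pos != -1 then
          (some (String.ofList (PySem.Chars.strip (PySem.List.slice e.toList none (some pos)))),
           PySem.List.slice e.toList (some pos) none)
        else (none, e.toList)
    let vars' := A_scan known (ar.2 ++ [' ']) vars [] []
    let known' := match ar.1 with
      | some a => if known.contains a then (PySem.List.remove? known a).getD known else known
      | none => known
    A_loop es known' vars'

def get_input_variables (expressions : List String) (known_variables : List String) : List String :=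
  A_loop expressions known_variables []

-- ===== PORT B =====
-- hand port of re.finditer("[^SEPS]+", rhs): the maximal runs of non-separator characters,
-- each paired with the character immediately before its start (none at position 0) — exact.
def B_tokens (cs : List Char) (prev : Option Char) : List (Option Char × List Char) :=
  match cs with
  | [] => []
  | c :: rest =>
    if pvIsSep c then B_tokens rest (some c)
    else (prev, c :: rest.takeWhile (fun d => !pvIsSep d)) ::
         B_tokens (rest.dropWhile (fun d => !pvIsSep d)) prev
termination_by cs.length
decreasing_by
  · simp
  · have := List.length_dropWhile_le (fun d => !pvIsSep d) rest
    simp; omega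

-- the list comprehension over the matches
def B_found (known : List String) (rhs : List Char) : List String :=
  (B_tokens rhs none).filterMap (fun pt =>
    if pt.1 != some '.' && known.contains (String.ofList pt.2) then some (String.ofList pt.2) else none)

-- assignment stripping (same source text as in A)
def B_splitAssign (e : String) : Option String × List Char :=
  if PySem.Str.isIn " <--> " e then
    let parts := PySem.Chars.splitOn e.toList " <--> ".toList
    (some (String.ofList (PySem.Chars.strip (PySem.List.pyGetD parts 0 []))), PySem.List.pyGetD parts 1 [])
  else
    let pos := pvAssignPos e.toList
    if pos != -1 then
      (some (String.ofList (PySem.Chars.strip (PySem.List.slice e.toList none (some pos)))),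
       PySem.List.slice e.toList (some pos) none)
    else (none, e.toList)

def B_loop : List String → List String → List String → List String
  | [], _, vars => vars
  | e :: es, known, vars =>
    let ar := B_splitAssign e
    let vars' := vars ++ B_found known ar.2
    let known' := match ar.1 with
      | some a => if known.contains a then (PySem.List.remove? known a).getD known else known
      | none => known
    B_loop es known' vars'

def get_input_variables_alt (expressions : List String) (known_variables : List String) : List String :=
  B_loop expressions known_variables []

-- ===== PRECONDITION & SPEC =====
def Spec_get_input_variables (expressions : List String) (known_variables : List String) (out : List String) : Prop := out = get_input_variables_alt expressions known_variables
instance (expressions : List String) (known_variables : List String) (out : List String) : Decidable (Spec_get_input_variables expressions known_variables out) := by unfold Spec_get_input_variables; infer_instance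

-- ===== CLAIM (what is proved, stated in full; the proofs are below) =====
def Claim_equal_get_input_variables : Prop := ∀ (expressions : List String) (known_variables : List String), Dom_get_input_variables expressions known_variables → Spec_get_input_variables expressions known_variables (get_input_variables expressions known_variables)

-- ===== LEMMAS AND PROOFS =====

def optPrev : Option Char → List Char
  | none => []
  | some c => [c]

-- consuming a run of non-separator chars just extends current_var
theorem A_scan_run (known : List String) (t : List Char) :
    ∀ (cs : List Char) (vars : List String) (cur last : List Char),
      (∀ c ∈ t, pvIsSep c = false) →
      A_scan known (t ++ cs) vars cur last = A_scan known cs vars (cur ++ t) last := by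
  induction t with
  | nil => intro cs vars cur last _; simp
  | cons c t' ih =>
    intro cs vars cur last h
    have hc : pvIsSep c = false := h c (by simp)
    simp only [List.cons_append, A_scan, hc, Bool.false_eq_true, if_false]
    rw [ih cs vars (cur ++ [c]) last (fun d hd => h d (by simp [hd]))]
    simp

theorem optPrev_ne_dot (prev : Option Char) : (optPrev prev != ['.']) = (prev != some '.') := by
  cases prev with
  | none => rfl
  | some c => simp [optPrev, bne]

theorem A_valid_of_run (c : Char) (t : List Char) (hc : pvIsSep c = false)
    (ht : ∀ d ∈ t, pvIsSep d = false) : A_isValidVariable (c :: t) = true := by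
  simp only [A_isValidVariable, List.length_cons]
  simp [hc]
  exact ht

-- key lemma: the state machine over cs+" " equals the tokenisation of cs
theorem A_scan_eq_tokens (known : List String) :
    ∀ (cs : List Char) (vars : List String) (prev : Option Char),
      A_scan known (cs ++ [' ']) vars [] (optPrev prev)
        = vars ++ (B_tokens cs prev).filterMap (fun pt =>
            if pt.1 != some '.' && known.contains (String.ofList pt.2) then some (String.ofList pt.2) else none)
  | [], vars, prev => by
    simp [A_scan, B_tokens, A_isValidVariable, pvIsSep]
  | c :: cs', vars, prev => by
    by_cases hc : pvIsSep c = true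
    · simp only [List.cons_append, A_scan, hc, if_true, A_isValidVariable, List.length_nil]
      simp only [B_tokens, hc, if_true]
      have := A_scan_eq_tokens known cs' vars (some c)
      simpa [optPrev] using this
    · have hc' : pvIsSep c = false := by simpa using hc
      set t := cs'.takeWhile (fun d => !pvIsSep d) with ht
      set rest := cs'.dropWhile (fun d => !pvIsSep d) with hrest
      have hsplit : cs' = t ++ rest := (List.takeWhile_append_dropWhile).symm
      have htall : ∀ d ∈ t, pvIsSep d = false := by
        intro d hd
        have := List.mem_takeWhile_imp (ht ▸ hd)
        simpa using this
      have hrun : A_scan known ((c :: t) ++ (rest ++ [' '])) vars [] (optPrev prev)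
          = A_scan known (rest ++ [' ']) vars (c :: t) (optPrev prev) := by
        have := A_scan_run known (c :: t) (rest ++ [' ']) vars [] (optPrev prev)
          (by intro d hd; rcases List.mem_cons.1 hd with h | h
              · subst h; exact hc'
              · exact htall d h)
        simpa using this
      have hvalid := A_valid_of_run c t hc' htall
      have hBtok : B_tokens (c :: cs') prev
          = (prev, c :: t) :: B_tokens rest prev := by
        rw [B_tokens]; simp [hc', ← ht, ← hrest]
      have hlist : (c :: cs') ++ [' '] = (c :: t) ++ (rest ++ [' ']) := by
        simp [hsplit]
      rw [hlist, hrun, hBtok]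
      cases hrc : rest with
      | nil =>
        simp only [List.nil_append, A_scan, pvIsSep]
        simp only [hvalid, optPrev_ne_dot, Bool.true_and, B_tokens,
          List.filterMap_cons, List.filterMap_nil]
        by_cases hP : ¬prev = some '.' ∧ String.ofList (c :: t) ∈ known
        · simp [hP]
        · simp [hP]
      | cons d rest' =>
        have hdrop : cs'.dropWhile (fun d => !pvIsSep d) = d :: rest' := hrest ▸ hrc
        have hd : pvIsSep d = true := by
          have hne : cs'.dropWhile (fun d => !pvIsSep d) ≠ [] := by simp [hdrop]
          have h2 := List.head_dropWhile_not (l := cs') (p := fun d => !pvIsSep d) hne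
          have h3 : (cs'.dropWhile (fun d => !pvIsSep d)).head hne = d := by simp [hdrop]
          rw [h3] at h2; simpa using h2
        have hrec : ∀ v, A_scan known (rest' ++ [' ']) v [] [d]
            = v ++ (B_tokens rest' (some d)).filterMap (fun pt =>
                if pt.1 != some '.' && known.contains (String.ofList pt.2) then some (String.ofList pt.2) else none) :=
          fun v => A_scan_eq_tokens known rest' v (some d)
        simp only [List.cons_append, A_scan, hd, if_true, hvalid, optPrev_ne_dot, Bool.true_and]
        rw [B_tokens]; simp only [hd, if_true]
        rw [hrec]
        by_cases hP : ¬prev = some '.' ∧ String.ofList (c :: t) ∈ known <;>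
          simp [hP]
  termination_by cs => cs.length
  decreasing_by
    · simp
    all_goals
      (have h1 := List.length_dropWhile_le (fun d => !pvIsSep d) cs'
       rw [hdrop] at h1
       simp only [List.length_cons] at h1 ⊢
       omega)

theorem loop_eq (es : List String) : ∀ (known vars : List String),
    A_loop es known vars = B_loop es known vars := by
  induction es with
  | nil => intro known vars; rfl
  | cons e es ih =>
    intro known vars
    rw [A_loop, B_loop]
    have har : (if PySem.Str.isIn " <--> " e then
        let parts := PySem.Chars.splitOn e.toList " <--> ".toList
        (some (String.ofList (PySem.Chars.strip (PySem.List.pyGetD parts 0 []))), PySem.List.pyGetD parts 1 [])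
      else
        let pos := pvAssignPos e.toList
        if pos != -1 then
          (some (String.ofList (PySem.Chars.strip (PySem.List.slice e.toList none (some pos)))),
           PySem.List.slice e.toList (some pos) none)
        else (none, e.toList)) = B_splitAssign e := by rw [B_splitAssign]
    rw [har]
    have hscan := A_scan_eq_tokens known (B_splitAssign e).2 vars none
    simp only [optPrev] at hscan
    rw [hscan, ih]
    rfl

-- ===== VERDICT (by name: the statement is the Claim_ definition above) =====
theorem get_input_variables_spec : Claim_equal_get_input_variables := by
  intro expressions known_variables _
  unfold Spec_get_input_variables get_input_variables get_input_variables_alt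
  exact loop_eq expressions known_variables []
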